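-- pv_equiv track=rewrite | github.com/hlecates/mining_high_utility | experiments/hui.py | build_utility_lists
-- ===== SOURCE A (Python) =====
-- def build_utility_lists(revised_trans):
--     ULs = {}
--     for tid, seq in revised_trans:
--         items, utils = zip(*seq)
--         n = len(items)
--         for idx, item in enumerate(items):
--             iu = utils[idx]
--             ru = sum(utils[idx+1:])
--             ULs.setdefault(item, []).append((tid, iu, ru))
--     return ULs
-- ===== SOURCE B (Python) =====
-- def build_utility_lists(revised_trans):
--     ULs = {}
--     for tid, seq in revised_trans:
--         # one reverse pass: remaining utility is a running suffix sum
--         ru = 0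
--         rev = []
--         for item, iu in reversed(seq):
--             rev.append((item, iu, ru))
--             ru += iu
--         for item, iu, r in reversed(rev):
--             ULs.setdefault(item, []).append((tid, iu, r))
--     return ULs
-- ===== Notes on version B (the rewrite author's own statement) =====
-- stated objective: faster
-- what changed: Per transaction, A re-sums the utility suffix utils[idx+1:] for every item; B makes one reverse pass keeping a running suffix sum and emits the triples in order.
import Mathlib
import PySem

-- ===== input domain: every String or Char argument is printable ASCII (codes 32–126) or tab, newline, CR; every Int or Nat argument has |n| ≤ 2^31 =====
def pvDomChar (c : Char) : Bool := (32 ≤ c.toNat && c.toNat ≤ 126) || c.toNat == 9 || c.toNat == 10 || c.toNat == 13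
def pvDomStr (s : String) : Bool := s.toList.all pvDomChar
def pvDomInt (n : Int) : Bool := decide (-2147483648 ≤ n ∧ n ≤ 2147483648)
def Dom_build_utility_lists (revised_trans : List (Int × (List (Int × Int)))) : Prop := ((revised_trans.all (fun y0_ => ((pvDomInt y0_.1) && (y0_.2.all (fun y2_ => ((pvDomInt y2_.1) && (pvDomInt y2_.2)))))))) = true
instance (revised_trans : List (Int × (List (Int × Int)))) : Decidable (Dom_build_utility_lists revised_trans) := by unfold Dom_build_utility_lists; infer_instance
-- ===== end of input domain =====

-- B replaces A's per-item re-summation of the utility suffix (quadratic per transaction)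
-- by one reverse pass keeping a running suffix sum (linear per transaction).

-- ===== PORT A =====
-- For each transaction: unzip, then for each index idx re-sum utils[idx+1:].
def build_utility_lists (revised_trans : List (Int × (List (Int × Int)))) : List (Int × List (Int × Int × Int)) :=
  (revised_trans.foldl
    (fun (ULs : PySem.Dict Int (List (Int × Int × Int))) t =>
      let tid := t.1
      let seq := t.2
      let items := seq.map Prod.fst
      let utils := seq.map Prod.snd
      (PySem.List.enumerate items 0).foldl
        (fun ULs p =>
          let idx := p.1
          let item := p.2
          let iu := PySem.List.pyGetD utils idx 0
          let ru := (PySem.List.slice utils (some (idx + 1)) none).sum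
          ULs.insert item (ULs.getD item [] ++ [(tid, iu, ru)]))
        ULs)
    PySem.Dict.empty).items

-- ===== PORT B =====
-- For each transaction: one reverse pass building (item, iu, running suffix sum), then emit in order.
def build_utility_lists_alt (revised_trans : List (Int × (List (Int × Int)))) : List (Int × List (Int × Int × Int)) :=
  (revised_trans.foldl
    (fun (ULs : PySem.Dict Int (List (Int × Int × Int))) t =>
      let tid := t.1
      let acc := t.2.reverse.foldl
        (fun (acc : List (Int × Int × Int) × Int) x =>
          (acc.1 ++ [(x.1, x.2, acc.2)], acc.2 + x.2)) ([], 0)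
      acc.1.reverse.foldl
        (fun ULs y =>
          ULs.insert y.1 (ULs.getD y.1 [] ++ [(tid, y.2.1, y.2.2)]))
        ULs)
    PySem.Dict.empty).items

-- ===== PRECONDITION & SPEC =====
-- Pre_ excludes transactions with an empty item sequence: there Python A raises
-- ValueError at 'items, utils = zip(*seq)'.
def Pre_build_utility_lists (revised_trans : List (Int × (List (Int × Int)))) : Prop :=
  ∀ t ∈ revised_trans, t.2 ≠ []
instance (revised_trans : List (Int × (List (Int × Int)))) : Decidable (Pre_build_utility_lists revised_trans) := by unfold Pre_build_utility_lists; infer_instance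
def pvWitness_build_utility_lists : (List (Int × (List (Int × Int)))) :=
  [(1, [(10, 2), (20, 3), (30, 4)]), (2, [(20, 1), (10, 5)])]

def Spec_build_utility_lists (revised_trans : List (Int × (List (Int × Int)))) (out : List (Int × List (Int × Int × Int))) : Prop := out = build_utility_lists_alt revised_trans
instance (revised_trans : List (Int × (List (Int × Int)))) (out : List (Int × List (Int × Int × Int))) : Decidable (Spec_build_utility_lists revised_trans out) := by unfold Spec_build_utility_lists; infer_instance

-- ===== CLAIM (what is proved, stated in full; the proofs are below) =====
def Claim_equal_build_utility_lists : Prop := ∀ (revised_trans : List (Int × (List (Int × Int)))), Dom_build_utility_lists revised_trans → Pre_build_utility_lists revised_trans → Spec_build_utility_lists revised_trans (build_utility_lists revised_trans)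

-- ===== LEMMAS AND PROOFS =====

-- The stream of (item, iu, remaining-utility) triples of one transaction, in order.
def pvTriples : List (Int × Int) → List (Int × Int × Int)
  | [] => []
  | (i, u) :: rest => (i, u, (rest.map Prod.snd).sum) :: pvTriples rest

-- A's enumerate-and-reslice pass produces exactly pvTriples (V is the already-consumed prefix of utils).
theorem pvMapA (seq : List (Int × Int)) : ∀ (V : List Int),
    (PySem.List.enumerate (seq.map Prod.fst) (V.length : Int)).map
      (fun p => (p.2, PySem.List.pyGetD (V ++ seq.map Prod.snd) p.1 0,
                 (PySem.List.slice (V ++ seq.map Prod.snd) (some (p.1 + 1)) none).sum))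
      = pvTriples seq := by
  induction seq with
  | nil => intro V; simp [pvTriples, PySem.List.enumerate_nil]
  | cons hd tl ih =>
    intro V
    obtain ⟨i, u⟩ := hd
    have h1 : (V.length : Int) + 1 = ((V ++ [u]).length : Int) := by
      simp
    have hl : V ++ ((i, u) :: tl).map Prod.snd = (V ++ [u]) ++ tl.map Prod.snd := by simp
    rw [hl]
    simp only [List.map_cons, PySem.List.enumerate_cons, pvTriples]
    rw [h1]
    congr 1
    · simp [PySem.List.pyGetD_natCast]
      rw [PySem.List.slice_from (V ++ u :: tl.map Prod.snd) (a := (V.length : Int) + 1) (by omega)]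
      rw [show ((V.length : Int) + 1).toNat = (V ++ [u]).length by simp,
          show V ++ u :: tl.map Prod.snd = (V ++ [u]) ++ tl.map Prod.snd by simp,
          List.drop_left]
    · exact ih (V ++ [u])

-- B's reverse pass returns (pvTriples reversed, total utility).
theorem pvRevB (seq : List (Int × Int)) :
    seq.reverse.foldl
      (fun (acc : List (Int × Int × Int) × Int) x =>
        (acc.1 ++ [(x.1, x.2, acc.2)], acc.2 + x.2)) ([], 0)
      = ((pvTriples seq).reverse, (seq.map Prod.snd).sum) := by
  induction seq with
  | nil => simp [pvTriples]
  | cons hd tl ih =>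
    obtain ⟨i, u⟩ := hd
    rw [List.reverse_cons, List.foldl_append, ih]
    simp [pvTriples, Int.add_comm]

-- Both per-transaction bodies are the same fold over pvTriples.
theorem pvStep_eq (ULs : PySem.Dict Int (List (Int × Int × Int))) (t : Int × List (Int × Int)) :
    (PySem.List.enumerate (t.2.map Prod.fst) 0).foldl
      (fun ULs p =>
        ULs.insert p.2 (ULs.getD p.2 [] ++
          [(t.1, PySem.List.pyGetD (t.2.map Prod.snd) p.1 0,
            (PySem.List.slice (t.2.map Prod.snd) (some (p.1 + 1)) none).sum)]))
      ULs
    = ((t.2.reverse.foldl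
        (fun (acc : List (Int × Int × Int) × Int) x =>
          (acc.1 ++ [(x.1, x.2, acc.2)], acc.2 + x.2)) ([], 0)).1.reverse.foldl
        (fun ULs y => ULs.insert y.1 (ULs.getD y.1 [] ++ [(t.1, y.2.1, y.2.2)]))
        ULs) := by
  rw [pvRevB, List.reverse_reverse]
  have hA := pvMapA t.2 []
  simp only [List.length_nil, Nat.cast_zero, List.nil_append] at hA
  rw [← hA, List.foldl_map]

theorem pvPorts_eq (rt : List (Int × List (Int × Int))) :
    build_utility_lists rt = build_utility_lists_alt rt := by
  unfold build_utility_lists build_utility_lists_alt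
  congr 1
  congr 1
  funext d t
  exact pvStep_eq d t

-- ===== VERDICT (by name: the statement is the Claim_ definition above) =====
theorem build_utility_lists_spec : Claim_equal_build_utility_lists := by
  intro rt _ _
  unfold Spec_build_utility_lists
  exact pvPorts_eq rt
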